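-- pv_equiv track=rewrite | github.com/cooldog98/oop_lesson | long_homework สำเนา/airline สำเนา.py | get_travel_fee
-- ===== SOURCE A (Python) =====
-- europe = ["England", "Germany", "Italy", "France", "Belgium"]
--
-- europe_distance = [9435, 8672, 8705, 9390, 9097]
--
-- asia = ["China", "Japan", "Indonesia", "India", "Singapore"]
--
-- asia_distance = [3442, 4312, 2333, 4213, 2108]
--
-- america = ["USA", "Canada", "Brazil", "Mexico", "Argentina"]
--
-- america_distance = [13920, 13280, 16545, 15392, 15640]
--
-- def get_travel_fee(country):
--     # Implement function to calculate travel fee based on country and region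
--     pass
--     if country in europe:
--         for i in range(len(country)):
--             position = europe.index(country)
--             price_new = [price*10 for price in europe_distance]
--             return (price_new[position], 'Europe')
--     elif country in asia:
--         for i in range(len(country)):
--             position = asia.index(country)
--             price_new = [price*10 for price in asia_distance]
--             return (price_new[position], 'Asia')
--     elif country in america:
--         for i in range(len(country)):
--             position = america.index(country)
--             price_new = [price*10 for price in america_distance]
--             return (price_new[position], 'America')
-- ===== SOURCE B (Python) =====
-- # B: one precomputed table, single dict lookup instead of three membership+index scans.
-- europe = ["England", "Germany", "Italy", "France", "Belgium"]
-- europe_distance = [9435, 8672, 8705, 9390, 9097]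
-- asia = ["China", "Japan", "Indonesia", "India", "Singapore"]
-- asia_distance = [3442, 4312, 2333, 4213, 2108]
-- america = ["USA", "Canada", "Brazil", "Mexico", "Argentina"]
-- america_distance = [13920, 13280, 16545, 15392, 15640]
--
-- _TABLE = {}
-- for _names, _dists, _label in ((europe, europe_distance, 'Europe'),
--                                (asia, asia_distance, 'Asia'),
--                                (america, america_distance, 'America')):
--     for _n, _d in zip(_names, _dists):
--         _TABLE[_n] = (_d * 10, _label)
--
-- def get_travel_fee(country):
--     return _TABLE.get(country)
-- ===== Notes on version B (the rewrite author's own statement) =====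
-- stated objective: simpler
-- what changed: B precomputes one country->(fee,region) table from the three (names,distances,label) groups and get_travel_fee is a single dict lookup, replacing A's three cascading membership tests each followed by a redundant for-loop, a .index scan and a full list rebuild.
import Mathlib
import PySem

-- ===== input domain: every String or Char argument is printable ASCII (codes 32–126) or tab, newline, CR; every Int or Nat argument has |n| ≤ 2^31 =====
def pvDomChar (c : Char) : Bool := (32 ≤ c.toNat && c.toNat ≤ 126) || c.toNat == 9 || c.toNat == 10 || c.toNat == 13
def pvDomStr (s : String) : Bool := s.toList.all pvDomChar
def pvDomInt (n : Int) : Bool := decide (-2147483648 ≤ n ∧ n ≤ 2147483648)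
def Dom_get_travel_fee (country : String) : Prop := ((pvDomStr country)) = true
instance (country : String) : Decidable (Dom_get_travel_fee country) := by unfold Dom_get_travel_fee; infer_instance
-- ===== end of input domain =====

-- B builds one country→(fee,region) table and does a single lookup; A does three
-- membership-and-.index scans. Objective: simpler.

-- ===== PORT A =====
def pvEurope : List String := ["England", "Germany", "Italy", "France", "Belgium"]
def pvEuropeDist : List Int := [9435, 8672, 8705, 9390, 9097]
def pvAsia : List String := ["China", "Japan", "Indonesia", "India", "Singapore"]
def pvAsiaDist : List Int := [3442, 4312, 2333, 4213, 2108]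
def pvAmerica : List String := ["USA", "Canada", "Brazil", "Mexico", "Argentina"]
def pvAmericaDist : List Int := [13920, 13280, 16545, 15392, 15640]

-- the 'for i in range(len(country))' loop returns on its first iteration (or never runs when
-- the string is empty, falling through to return None): ported as the length-0 test.
def pvBranchA (country : String) (names : List String) (dists : List Int) (label : String) :
    Option (Int × String) :=
  if PySem.Str.len country = 0 then none
  else
    match PySem.List.index? names country with
    | none => none   -- unreachable: membership was checked; .index cannot raise
    | some position =>
      let price_new := dists.map (· * 10)
      match PySem.List.pyGet? price_new (Int.ofNat position) with
      | none => none
      | some p => some (p, label)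

def get_travel_fee (country : String) : Option (Int × String) :=
  if pvEurope.contains country then pvBranchA country pvEurope pvEuropeDist "Europe"
  else if pvAsia.contains country then pvBranchA country pvAsia pvAsiaDist "Asia"
  else if pvAmerica.contains country then pvBranchA country pvAmerica pvAmericaDist "America"
  else none

-- ===== PORT B =====
def pvTable : PySem.Dict String (Int × String) :=
  [(pvEurope, pvEuropeDist, "Europe"), (pvAsia, pvAsiaDist, "Asia"),
   (pvAmerica, pvAmericaDist, "America")].foldl
    (fun t g => (g.1.zip g.2.1).foldl (fun t p => t.insert p.1 (p.2 * 10, g.2.2)) t)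
    PySem.Dict.empty

def get_travel_fee_alt (country : String) : Option (Int × String) :=
  pvTable.get? country

-- ===== PRECONDITION & SPEC =====
def Spec_get_travel_fee (country : String) (out : Option (Int × String)) : Prop := out = get_travel_fee_alt country
instance (country : String) (out : Option (Int × String)) : Decidable (Spec_get_travel_fee country out) := by unfold Spec_get_travel_fee; infer_instance

-- ===== CLAIM (what is proved, stated in full; the proofs are below) =====
def Claim_equal_get_travel_fee : Prop := ∀ (country : String), Dom_get_travel_fee country → Spec_get_travel_fee country (get_travel_fee country)

-- ===== LEMMAS AND PROOFS =====

-- ===== VERDICT (by name: the statement is the Claim_ definition above) =====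
theorem get_travel_fee_spec : Claim_equal_get_travel_fee := by
  intro country _
  unfold Spec_get_travel_fee
  by_cases hm : country ∈ pvEurope ++ pvAsia ++ pvAmerica
  · simp only [pvEurope, pvAsia, pvAmerica, List.cons_append,
      List.nil_append, List.mem_cons, List.not_mem_nil, or_false] at hm
    rcases hm with h|h|h|h|h|h|h|h|h|h|h|h|h|h|h <;> subst h <;> rfl
  · simp only [pvEurope, pvAsia, pvAmerica, List.cons_append,
      List.nil_append, List.mem_cons, List.not_mem_nil, or_false, not_or] at hm
    obtain ⟨h1,h2,h3,h4,h5,h6,h7,h8,h9,h10,h11,h12,h13,h14,h15⟩ := hm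
    have e : pvTable = PySem.Dict.mk
      [("England", (94350, "Europe")), ("Germany", (86720, "Europe")),
       ("Italy", (87050, "Europe")), ("France", (93900, "Europe")),
       ("Belgium", (90970, "Europe")), ("China", (34420, "Asia")),
       ("Japan", (43120, "Asia")), ("Indonesia", (23330, "Asia")),
       ("India", (42130, "Asia")), ("Singapore", (21080, "Asia")),
       ("USA", (139200, "America")), ("Canada", (132800, "America")),
       ("Brazil", (165450, "America")), ("Mexico", (153920, "America")),
       ("Argentina", (156400, "America"))] := by rfl
    simp [get_travel_fee, get_travel_fee_alt, e, pvEurope, pvAsia, pvAmerica,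
      h1,h2,h3,h4,h5,h6,h7,h8,h9,h10,h11,h12,h13,h14,h15,
      Ne.symm h1, Ne.symm h2, Ne.symm h3, Ne.symm h4, Ne.symm h5, Ne.symm h6,
      Ne.symm h7, Ne.symm h8, Ne.symm h9, Ne.symm h10, Ne.symm h11, Ne.symm h12,
      Ne.symm h13, Ne.symm h14, Ne.symm h15, PySem.Dict.get?]
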